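-- pv_equiv track=rewrite | github.com/gabriellcsilva/gaprocessmining | precision_calc.py | positional_set
-- ===== SOURCE A (Python) =====
-- def positional_set(logs):
--     # It ends with some extra stuff on the sets when i have concurrent structures, like a and of xORs. Think if there's
--     # Some way to correct that
--     pos_dict = {'process': {'start': set(), 'end': set()}}
--     for trace in logs:
--         for k, i in enumerate(trace):
--             if i not in pos_dict.keys():
--                 pos_dict[i] = {'before': set(),
--                                'after': set()}  # Inicializing the sets for given task if it's not already
--             i_index = k  # Getting the position of the task in the trace
--             if i_index == 0:
--                 # This extra condition is when i have a trace with only one task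
--                 if i_index == len(trace) - 1:
--                     pos_dict['process']['start'].add(i)
--                     pos_dict['process']['end'].add(i)
--                 else:
--                     pos_dict[i]['after'].add(trace[i_index + 1])
--                     pos_dict['process']['start'].add(i)
--
--             elif i_index < len(trace) - 1:
--                 pos_dict[i]['before'].add(trace[i_index - 1])
--                 pos_dict[i]['after'].add(trace[i_index + 1])
--             else:
--                 pos_dict[i]['before'].add(trace[i_index - 1])
--                 pos_dict['process']['end'].add(i)
--     '''for foo, bar in pos_dict.items():
--         intersect = bar['before'] & bar['after']
--         bar['before'] -= intersect
--         bar['after'] -= intersect'''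
--     return pos_dict
-- ===== SOURCE B (Python) =====
-- def positional_set(logs):
--     pos_dict = {'process': {'start': set(), 'end': set()}}
--     for trace in logs:
--         if not trace:
--             continue
--         for i in trace:
--             if i not in pos_dict:
--                 pos_dict[i] = {'before': set(), 'after': set()}
--         pos_dict['process']['start'].add(trace[0])
--         pos_dict['process']['end'].add(trace[-1])
--         for a, b in zip(trace, trace[1:]):
--             pos_dict[a]['after'].add(b)
--             pos_dict[b]['before'].add(a)
--     return pos_dict
-- ===== Notes on version B (the rewrite author's own statement) =====
-- stated objective: simpler
-- what changed: Replaces A's per-position enumerate scan with its first/middle/last index branching and trace[i-1]/trace[i+1] indexing by three plain passes per trace: initialize all tasks, record the two endpoints, then one zip(trace, trace[1:]) pass adding each adjacent pair to 'after'/'before'.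
import Mathlib
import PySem

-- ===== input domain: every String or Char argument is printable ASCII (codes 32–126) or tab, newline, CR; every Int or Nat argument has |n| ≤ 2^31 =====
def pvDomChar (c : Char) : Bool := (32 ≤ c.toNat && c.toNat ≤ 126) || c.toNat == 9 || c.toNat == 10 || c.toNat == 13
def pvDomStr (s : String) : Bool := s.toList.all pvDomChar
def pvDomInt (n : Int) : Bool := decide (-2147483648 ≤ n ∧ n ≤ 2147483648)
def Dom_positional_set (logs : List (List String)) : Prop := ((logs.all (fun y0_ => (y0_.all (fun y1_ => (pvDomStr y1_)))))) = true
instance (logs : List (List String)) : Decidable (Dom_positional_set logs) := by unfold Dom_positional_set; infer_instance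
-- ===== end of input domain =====

-- B replaces A's per-position index branching by three plain passes per trace (init, endpoints,
-- adjacent pairs via zip) — objective: simpler; same asymptotic cost.
-- (A mutates nothing; the dicts are compared as returned values.)

-- shared modelling of the Python dict-of-dict-of-set operations
def pvBA : PySem.Dict String (PySem.Set String) :=
  (PySem.Dict.empty.insert "before" PySem.Set.empty).insert "after" PySem.Set.empty
def pvPS : PySem.Dict String (PySem.Set String) :=
  (PySem.Dict.empty.insert "start" PySem.Set.empty).insert "end" PySem.Set.empty
def pvInit : PySem.Dict String (PySem.Dict String (PySem.Set String)) :=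
  PySem.Dict.empty.insert "process" pvPS
-- pos_dict[k][f].add(v)  (total modelling; under Pre_ the keys touched are always present)
def pvAdd (d : PySem.Dict String (PySem.Dict String (PySem.Set String))) (k f v : String) :
    PySem.Dict String (PySem.Dict String (PySem.Set String)) :=
  d.modify k PySem.Dict.empty (fun p => p.modify f PySem.Set.empty (fun s => PySem.Set.add s v))
-- "if i not in pos_dict: pos_dict[i] = {'before': set(), 'after': set()}"
def pvEnsure (d : PySem.Dict String (PySem.Dict String (PySem.Set String))) (i : String) :
    PySem.Dict String (PySem.Dict String (PySem.Set String)) :=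
  if d.contains i then d else d.insert i pvBA

-- ===== PORT A =====
-- loop body of A's "for k, i in enumerate(trace)"
def pvAbody (trace : List String) (d : PySem.Dict String (PySem.Dict String (PySem.Set String)))
    (ki : Int × String) : PySem.Dict String (PySem.Dict String (PySem.Set String)) :=
  let i := ki.2
  let d := pvEnsure d i
  let iIndex := ki.1
  if iIndex = 0 then
    if iIndex = (trace.length : Int) - 1 then
      pvAdd (pvAdd d "process" "start" i) "process" "end" i
    else
      pvAdd (pvAdd d i "after" (PySem.List.pyGetD trace (iIndex + 1) "")) "process" "start" i
  else if iIndex < (trace.length : Int) - 1 then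
    pvAdd (pvAdd d i "before" (PySem.List.pyGetD trace (iIndex - 1) "")) i "after"
      (PySem.List.pyGetD trace (iIndex + 1) "")
  else
    pvAdd (pvAdd d i "before" (PySem.List.pyGetD trace (iIndex - 1) "")) "process" "end" i

def pvAstep (d : PySem.Dict String (PySem.Dict String (PySem.Set String))) (trace : List String) :
    PySem.Dict String (PySem.Dict String (PySem.Set String)) :=
  (PySem.List.enumerate trace).foldl (pvAbody trace) d

def positional_set (logs : List (List String)) : List (String × List (String × List String)) :=
  ((logs.foldl pvAstep pvInit).items).map (fun p => (p.1, p.2.items))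

-- ===== PORT B =====
def pvBstep (d : PySem.Dict String (PySem.Dict String (PySem.Set String))) (trace : List String) :
    PySem.Dict String (PySem.Dict String (PySem.Set String)) :=
  match trace with
  | [] => d                                       -- "if not trace: continue"
  | t0 :: rest =>
    let d := trace.foldl pvEnsure d               -- init pass
    let d := pvAdd d "process" "start" t0         -- trace[0]
    let d := pvAdd d "process" "end" (PySem.List.pyGetD trace (-1) "")   -- trace[-1]
    (trace.zip rest).foldl                        -- "for a, b in zip(trace, trace[1:])"
      (fun d ab => pvAdd (pvAdd d ab.1 "after" ab.2) ab.2 "before" ab.1) d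

def positional_set_alt (logs : List (List String)) : List (String × List (String × List String)) :=
  ((logs.foldl pvBstep pvInit).items).map (fun p => (p.1, p.2.items))

-- ===== PRECONDITION & SPEC =====
-- Pre_ excludes exactly the inputs on which A raises KeyError: a trace of length ≥ 2 containing a
-- task literally named "process" collides with the sentinel key (its inner dict has no
-- 'before'/'after'); B raises KeyError there too.
def Pre_positional_set (logs : List (List String)) : Prop :=
  ∀ t ∈ logs, "process" ∈ t → t.length = 1
instance (logs : List (List String)) : Decidable (Pre_positional_set logs) := by
  unfold Pre_positional_set; infer_instance

def pvWitness_positional_set : List (List String) := [["a", "b"], ["b", "c", "a"], ["process"], []]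

def Spec_positional_set (logs : List (List String)) (out : List (String × List (String × List String))) : Prop := out = positional_set_alt logs
instance (logs : List (List String)) (out : List (String × List (String × List String))) : Decidable (Spec_positional_set logs out) := by unfold Spec_positional_set; infer_instance

-- ===== CLAIM (what is proved, stated in full; the proofs are below) =====
def Claim_equal_positional_set : Prop := ∀ (logs : List (List String)), Dom_positional_set logs → Pre_positional_set logs → Spec_positional_set logs (positional_set logs)

-- ===== LEMMAS AND PROOFS =====

-- proof-side machinery: the "events" (key, field, value) a trace generates
def pvEvApply (d : PySem.Dict String (PySem.Dict String (PySem.Set String)))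
    (evs : List (String × String × String)) : PySem.Dict String (PySem.Dict String (PySem.Set String)) :=
  evs.foldl (fun d e => pvAdd d e.1 e.2.1 e.2.2) d

-- A's before/after events from the second position on, given the previous element
def pvTpe (prev : String) : List String → List (String × String × String)
  | [] => []
  | [x] => [(x, "before", prev)]
  | x :: y :: r => (x, "before", prev) :: (x, "after", y) :: pvTpe x (y :: r)

-- B's pairwise events
def pvPairEvents : List String → List (String × String × String)
  | x :: y :: r => (x, "after", y) :: (y, "before", x) :: pvPairEvents (y :: r)
  | _ => []

lemma contains_pvAdd (d : PySem.Dict String (PySem.Dict String (PySem.Set String))) (k f v k' : String) :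
    (pvAdd d k f v).contains k' = (k' == k || d.contains k') := by
  simp [pvAdd, PySem.Dict.modify, PySem.Dict.contains_insert]

lemma contains_pvAdd_of (d : PySem.Dict String (PySem.Dict String (PySem.Set String))) (k f v k' : String)
    (h : d.contains k' = true) : (pvAdd d k f v).contains k' = true := by
  simp [contains_pvAdd, h]

lemma contains_pvEnsure (d : PySem.Dict String (PySem.Dict String (PySem.Set String))) (i k' : String) :
    (pvEnsure d i).contains k' = (k' == i || d.contains k') := by
  unfold pvEnsure
  split_ifs with h
  · by_cases hbe : k' = i
    · subst hbe; simp [h]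
    · simp [hbe]
  · simp [PySem.Dict.contains_insert]

lemma pvInsert_comm (d : PySem.Dict String (PySem.Dict String (PySem.Set String)))
    (k1 k2 : String) (v1 v2 : PySem.Dict String (PySem.Set String)) (hne : k1 ≠ k2)
    (h1 : d.contains k1 = true) (h2 : d.contains k2 = true) :
    (d.insert k1 v1).insert k2 v2 = (d.insert k2 v2).insert k1 v1 := by
  have c2 : (d.insert k1 v1).contains k2 = true := by
    rw [PySem.Dict.contains_insert]; simp [h2]
  have c1 : (d.insert k2 v2).contains k1 = true := by
    rw [PySem.Dict.contains_insert]; simp [h1]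
  apply PySem.Dict.ext
  rw [PySem.Dict.items_insert_of_contains _ _ c2, PySem.Dict.items_insert_of_contains _ _ h1,
    PySem.Dict.items_insert_of_contains _ _ c1, PySem.Dict.items_insert_of_contains _ _ h2,
    List.map_map, List.map_map]
  apply List.map_congr_left
  intro p _
  by_cases e1 : p.1 = k1
  · simp [e1, hne, Ne.symm hne]
  · by_cases e2 : p.1 = k2 <;> simp [e1, e2, hne, Ne.symm hne]

lemma pvInsert_append_comm (d : PySem.Dict String (PySem.Dict String (PySem.Set String)))
    (k i : String) (w u : PySem.Dict String (PySem.Set String))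
    (hk : d.contains k = true) (hi0 : d.contains i = false) (hik : i ≠ k) :
    (d.insert k w).insert i u = (d.insert i u).insert k w := by
  have ci : (d.insert k w).contains i = false := by
    rw [PySem.Dict.contains_insert]; simp [hik, hi0]
  have ck : (d.insert i u).contains k = true := by
    rw [PySem.Dict.contains_insert]; simp [hk]
  apply PySem.Dict.ext
  rw [PySem.Dict.items_insert_of_not_contains _ _ ci,
    PySem.Dict.items_insert_of_contains _ _ hk,
    PySem.Dict.items_insert_of_contains _ _ ck,
    PySem.Dict.items_insert_of_not_contains _ _ hi0,
    List.map_append]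
  simp [hik]

lemma pvAdd_comm (d : PySem.Dict String (PySem.Dict String (PySem.Set String)))
    (k1 k2 f1 v1 f2 v2 : String) (hne : k1 ≠ k2)
    (h1 : d.contains k1 = true) (h2 : d.contains k2 = true) :
    pvAdd (pvAdd d k1 f1 v1) k2 f2 v2 = pvAdd (pvAdd d k2 f2 v2) k1 f1 v1 := by
  simp only [pvAdd, PySem.Dict.modify]
  rw [PySem.Dict.getD_insert_of_ne _ _ _ (Ne.symm hne), PySem.Dict.getD_insert_of_ne _ _ _ hne]
  exact pvInsert_comm d k1 k2 _ _ hne h1 h2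

lemma pvEnsure_pvAdd_comm (d : PySem.Dict String (PySem.Dict String (PySem.Set String)))
    (k f v i : String) (hk : d.contains k = true) :
    pvEnsure (pvAdd d k f v) i = pvAdd (pvEnsure d i) k f v := by
  by_cases hi : d.contains i = true
  · have hi' : (pvAdd d k f v).contains i = true := contains_pvAdd_of d k f v i hi
    simp [pvEnsure, hi, hi']
  · have hik : i ≠ k := fun e => hi (e ▸ hk)
    have hi0 : d.contains i = false := by simpa using hi
    have hi2 : (pvAdd d k f v).contains i = false := by
      rw [contains_pvAdd]; simp [hik, hi0]
    simp only [pvEnsure, hi2, hi0, Bool.false_eq_true, if_false]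
    simp only [pvAdd, PySem.Dict.modify]
    rw [PySem.Dict.getD_insert_of_ne _ _ _ (Ne.symm hik)]
    exact pvInsert_append_comm d k i _ pvBA hk hi0 hik

lemma ensureAll_pvAdd_comm (l : List String) (d : PySem.Dict String (PySem.Dict String (PySem.Set String)))
    (k f v : String) (hk : d.contains k = true) :
    (l.foldl pvEnsure (pvAdd d k f v)) = pvAdd (l.foldl pvEnsure d) k f v := by
  induction l generalizing d with
  | nil => rfl
  | cons x l ih =>
    simp only [List.foldl_cons]
    rw [pvEnsure_pvAdd_comm d k f v x hk]
    exact ih (pvEnsure d x) (by rw [contains_pvEnsure]; simp [hk])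

lemma contains_ensureAll_of (l : List String) (d : PySem.Dict String (PySem.Dict String (PySem.Set String)))
    (k : String) (h : d.contains k = true) : (l.foldl pvEnsure d).contains k = true := by
  induction l generalizing d with
  | nil => exact h
  | cons x l ih =>
    simp only [List.foldl_cons]
    exact ih (pvEnsure d x) (by rw [contains_pvEnsure]; simp [h])

lemma contains_ensureAll_of_mem (l : List String) (d : PySem.Dict String (PySem.Dict String (PySem.Set String)))
    (k : String) (h : k ∈ l) : (l.foldl pvEnsure d).contains k = true := by
  induction l generalizing d with
  | nil => simp at h
  | cons x l ih =>
    simp only [List.foldl_cons]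
    rcases List.mem_cons.mp h with rfl | hm
    · exact contains_ensureAll_of l (pvEnsure d k) k (by rw [contains_pvEnsure]; simp)
    · exact ih (pvEnsure d x) hm

lemma contains_pvEvApply_of (evs : List (String × String × String))
    (d : PySem.Dict String (PySem.Dict String (PySem.Set String))) (k : String)
    (h : d.contains k = true) : (pvEvApply d evs).contains k = true := by
  induction evs generalizing d with
  | nil => exact h
  | cons e evs ih =>
    simp only [pvEvApply, List.foldl_cons] at *
    exact ih _ (contains_pvAdd_of d e.1 e.2.1 e.2.2 k h)

lemma pvEvApply_pvAdd_comm (evs : List (String × String × String))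
    (d : PySem.Dict String (PySem.Dict String (PySem.Set String))) (k f v : String)
    (hk : d.contains k = true)
    (hevs : ∀ e ∈ evs, d.contains e.1 = true ∧ e.1 ≠ k) :
    pvEvApply (pvAdd d k f v) evs = pvAdd (pvEvApply d evs) k f v := by
  induction evs generalizing d with
  | nil => rfl
  | cons e evs ih =>
    obtain ⟨he1, he2⟩ := hevs e (List.mem_cons_self)
    simp only [pvEvApply, List.foldl_cons] at *
    rw [pvAdd_comm d k e.1 f v e.2.1 e.2.2 (Ne.symm he2) hk he1]
    exact ih (pvAdd d e.1 e.2.1 e.2.2)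
      (contains_pvAdd_of d e.1 e.2.1 e.2.2 k hk)
      (fun e' he' => ⟨contains_pvAdd_of d e.1 e.2.1 e.2.2 e'.1 (hevs e' (List.mem_cons_of_mem e he')).1,
        (hevs e' (List.mem_cons_of_mem e he')).2⟩)

lemma pvTpe_keys (prev : String) (u : List String) (e : String × String × String)
    (h : e ∈ pvTpe prev u) : e.1 ∈ u := by
  induction u generalizing prev with
  | nil => simp [pvTpe] at h
  | cons x u ih =>
    cases u with
    | nil => simp [pvTpe] at h; simp [h]
    | cons y r =>
      simp only [pvTpe, List.mem_cons] at h
      rcases h with rfl | rfl | h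
      · simp
      · simp
      · exact List.mem_cons_of_mem x (ih x h)

lemma pvPairEvents_eq (x y : String) (r : List String) :
    pvPairEvents (x :: y :: r) = (x, "after", y) :: pvTpe x (y :: r) := by
  induction r generalizing x y with
  | nil => rfl
  | cons z r ih =>
    show (x, "after", y) :: (y, "before", x) :: pvPairEvents (y :: z :: r)
        = (x, "after", y) :: pvTpe x (y :: z :: r)
    rw [ih y z]
    rfl

lemma pvZipfold_eq (l : List String) (d : PySem.Dict String (PySem.Dict String (PySem.Set String))) :
    (l.zip l.tail).foldl (fun d ab => pvAdd (pvAdd d ab.1 "after" ab.2) ab.2 "before" ab.1) d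
      = pvEvApply d (pvPairEvents l) := by
  induction l generalizing d with
  | nil => rfl
  | cons x l ih =>
    cases l with
    | nil => rfl
    | cons y r =>
      have h := ih (pvAdd (pvAdd d x "after" y) y "before" x)
      simp only [List.tail_cons] at h
      simp only [List.zip_cons_cons, List.foldl_cons, pvPairEvents, pvEvApply] at h ⊢
      exact h

lemma pvZipfold_eq' (t0 : String) (rest : List String)
    (d : PySem.Dict String (PySem.Dict String (PySem.Set String))) :
    ((t0 :: rest).zip rest).foldl
        (fun d ab => pvAdd (pvAdd d ab.1 "after" ab.2) ab.2 "before" ab.1) d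
      = pvEvApply d (pvPairEvents (t0 :: rest)) := pvZipfold_eq (t0 :: rest) d

lemma pvA_mid (u : List String) (pre : List String) (prev x : String)
    (d : PySem.Dict String (PySem.Dict String (PySem.Set String))) :
    (PySem.List.enumerate (x :: u) ((pre.length : Int) + 1)).foldl
        (pvAbody (pre ++ prev :: x :: u)) d
      = pvAdd (pvEvApply ((x :: u).foldl pvEnsure d) (pvTpe prev (x :: u))) "process" "end"
          ((x :: u).getLast (by simp)) := by
  induction u generalizing pre prev x d with
  | nil =>
    rw [PySem.List.enumerate_cons, PySem.List.enumerate_nil]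
    simp only [List.foldl_cons, List.foldl_nil]
    unfold pvAbody
    have h0 : ¬ ((pre.length : Int) + 1 = 0) := by omega
    have hl : (((pre ++ prev :: [x]).length : Nat) : Int) = (pre.length : Int) + 2 := by
      simp [List.length_append]
    have h1 : ¬ ((pre.length : Int) + 1 < (((pre ++ prev :: [x]).length : Nat) : Int) - 1) := by
      rw [hl]; omega
    simp only [if_neg h0, if_neg h1]
    have hprev : PySem.List.pyGetD (pre ++ prev :: [x]) ((pre.length : Int) + 1 - 1) "" = prev := by
      have he : ((pre.length : Int) + 1 - 1) = ((pre.length : Nat) : Int) := by omega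
      rw [he, PySem.List.pyGetD_natCast, List.getD_append_right _ _ _ _ (le_refl _)]
      simp
    rw [hprev]
    rfl
  | cons y r ih =>
    rw [PySem.List.enumerate_cons]
    simp only [List.foldl_cons]
    have hbody : pvAbody (pre ++ prev :: x :: y :: r) d ((pre.length : Int) + 1, x)
        = pvAdd (pvAdd (pvEnsure d x) x "before" prev) x "after" y := by
      unfold pvAbody
      have h0 : ¬ ((pre.length : Int) + 1 = 0) := by omega
      have hl : (((pre ++ prev :: x :: y :: r).length : Nat) : Int)
          = (pre.length : Int) + 3 + (r.length : Int) := by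
        simp [List.length_append]; push_cast; ring
      have h1 : ((pre.length : Int) + 1 < (((pre ++ prev :: x :: y :: r).length : Nat) : Int) - 1) := by
        rw [hl]
        have : (0 : Int) ≤ (r.length : Int) := Int.natCast_nonneg _
        omega
      simp only [if_neg h0, if_pos h1]
      have hprev : PySem.List.pyGetD (pre ++ prev :: x :: y :: r) ((pre.length : Int) + 1 - 1) "" = prev := by
        have he : ((pre.length : Int) + 1 - 1) = ((pre.length : Nat) : Int) := by omega
        rw [he, PySem.List.pyGetD_natCast, List.getD_append_right _ _ _ _ (le_refl _)]
        simp
      have hnext : PySem.List.pyGetD (pre ++ prev :: x :: y :: r) ((pre.length : Int) + 1 + 1) "" = y := by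
        have he : ((pre.length : Int) + 1 + 1) = ((pre.length + 2 : Nat) : Int) := by push_cast; ring
        rw [he, PySem.List.pyGetD_natCast, List.getD_append_right _ _ _ _ (by omega)]
        simp
      rw [hprev, hnext]
    rw [hbody]
    have harr : pre ++ prev :: x :: y :: r = (pre ++ [prev]) ++ x :: y :: r := by simp
    have hstart : ((pre.length : Int) + 1 + 1) = (((pre ++ [prev]).length : Nat) : Int) + 1 := by
      simp [List.length_append]
    rw [harr, hstart, ih (pre ++ [prev]) x y (pvAdd (pvAdd (pvEnsure d x) x "before" prev) x "after" y)]
    have c1 : (pvEnsure d x).contains x = true := by rw [contains_pvEnsure]; simp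
    have c2 : (pvAdd (pvEnsure d x) x "before" prev).contains x = true :=
      contains_pvAdd_of _ _ _ _ _ c1
    rw [ensureAll_pvAdd_comm (y :: r) _ x "after" y c2,
      ensureAll_pvAdd_comm (y :: r) _ x "before" prev c1]
    simp only [List.foldl_cons, pvTpe, pvEvApply, List.getLast_cons]
    rfl

lemma pvStep_eq (d : PySem.Dict String (PySem.Dict String (PySem.Set String)))
    (hP : d.contains "process" = true) (t : List String)
    (hpre : "process" ∈ t → t.length = 1) :
    pvAstep d t = pvBstep d t := by
  cases t with
  | nil => rfl
  | cons x rest =>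
    cases rest with
    | nil =>
      unfold pvAstep pvBstep
      rw [PySem.List.enumerate_cons, PySem.List.enumerate_nil]
      simp only [List.foldl_cons, List.foldl_nil, List.zip_nil_right]
      unfold pvAbody
      have h0 : ((0 : Int) = 0) := rfl
      have h1 : ((0 : Int) = (([x].length : Nat) : Int) - 1) := by simp
      rw [if_pos h0, if_pos h1]
      rw [PySem.List.pyGetD_neg_one _ _ (by simp : (x :: ([] : List String)) ≠ [])]
      rfl
    | cons y r =>
      have hproc : "process" ∉ x :: y :: r := fun hm => by
        have := hpre hm; simp at this
      have hx : x ≠ "process" := fun e => hproc (by simp [e])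
      -- A side
      unfold pvAstep
      rw [PySem.List.enumerate_cons]
      simp only [List.foldl_cons]
      have hbody : pvAbody (x :: y :: r) d ((0 : Int), x)
          = pvAdd (pvAdd (pvEnsure d x) x "after" y) "process" "start" x := by
        unfold pvAbody
        have h0 : ((0 : Int) = 0) := rfl
        have h1 : ¬ ((0 : Int) = (((x :: y :: r).length : Nat) : Int) - 1) := by
          simp only [List.length_cons]
          push_cast
          have : (0 : Int) ≤ (r.length : Int) := Int.natCast_nonneg _
          omega
        rw [if_pos h0, if_neg h1]
        have hnext : PySem.List.pyGetD (x :: y :: r) ((0 : Int) + 1) "" = y := by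
          have he : ((0 : Int) + 1) = ((1 : Nat) : Int) := by norm_num
          rw [he, PySem.List.pyGetD_natCast]
          rfl
        rw [hnext]
      rw [hbody]
      have hmid := pvA_mid r ([] : List String) x y
        (pvAdd (pvAdd (pvEnsure d x) x "after" y) "process" "start" x)
      simp only [List.length_nil, List.nil_append, Nat.cast_zero, zero_add] at hmid
      simp only [zero_add]
      rw [hmid]
      -- commute the two position-0 events out of the ensure pass
      have cx : (pvEnsure d x).contains x = true := by rw [contains_pvEnsure]; simp
      have cP : (pvAdd (pvEnsure d x) x "after" y).contains "process" = true := by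
        rw [contains_pvAdd, contains_pvEnsure]; simp [hP]
      rw [ensureAll_pvAdd_comm (y :: r) _ "process" "start" x cP,
        ensureAll_pvAdd_comm (y :: r) _ x "after" y cx]
      -- B side
      show _ = pvBstep d (x :: y :: r)
      simp only [pvBstep, List.foldl_cons]
      rw [pvZipfold_eq', pvPairEvents_eq]
      rw [PySem.List.pyGetD_neg_one _ _ (by simp : (x :: y :: r) ≠ [])]
      have hlast : (x :: y :: r).getLast (by simp) = (y :: r).getLast (by simp) :=
        List.getLast_cons _
      rw [hlast]
      -- abbreviations
      set E := (y :: r).foldl pvEnsure (pvEnsure d x) with hE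
      set L := (y :: r).getLast (by simp) with hL
      have cEP : E.contains "process" = true := by
        apply contains_ensureAll_of
        rw [contains_pvEnsure]; simp [hP]
      have cEx : E.contains x = true := by
        apply contains_ensureAll_of
        rw [contains_pvEnsure]; simp
      -- pvEvApply over the cons event list
      show pvAdd (pvEvApply (pvAdd (pvAdd E x "after" y) "process" "start" x) (pvTpe x (y :: r)))
          "process" "end" L
        = pvEvApply (pvAdd (pvAdd E "process" "start" x) "process" "end" L)
            ((x, "after", y) :: pvTpe x (y :: r))
      have step1 : pvEvApply (pvAdd (pvAdd E "process" "start" x) "process" "end" L)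
            ((x, "after", y) :: pvTpe x (y :: r))
          = pvEvApply (pvAdd (pvAdd (pvAdd E "process" "start" x) "process" "end" L) x "after" y)
              (pvTpe x (y :: r)) := rfl
      rw [step1]
      have cP1 : (pvAdd E "process" "start" x).contains "process" = true :=
        contains_pvAdd_of _ _ _ _ _ cEP
      have cx1 : (pvAdd E "process" "start" x).contains x = true :=
        contains_pvAdd_of _ _ _ _ _ cEx
      rw [pvAdd_comm (pvAdd E "process" "start" x) "process" x "end" L "after" y
        (Ne.symm hx) cP1 cx1]
      rw [pvAdd_comm E "process" x "start" x "after" y (Ne.symm hx) cEP cEx]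
      rw [pvEvApply_pvAdd_comm (pvTpe x (y :: r)) _ "process" "end" L
        (by exact contains_pvAdd_of _ _ _ _ _ (contains_pvAdd_of _ _ _ _ _ cEP))
        ?hevs]
      case hevs =>
        intro e he
        have hmem : e.1 ∈ y :: r := pvTpe_keys x (y :: r) e he
        constructor
        · apply contains_pvAdd_of; apply contains_pvAdd_of
          apply contains_ensureAll_of_mem
          exact hmem
        · intro hcontra
          exact hproc (by rw [← hcontra]; exact List.mem_cons_of_mem x hmem)

lemma contains_pvBstep (d : PySem.Dict String (PySem.Dict String (PySem.Set String)))
    (t : List String) (hP : d.contains "process" = true) :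
    (pvBstep d t).contains "process" = true := by
  cases t with
  | nil => exact hP
  | cons x rest =>
    simp only [pvBstep]
    rw [pvZipfold_eq']
    apply contains_pvEvApply_of
    apply contains_pvAdd_of
    apply contains_pvAdd_of
    simp only [List.foldl_cons]
    apply contains_ensureAll_of
    rw [contains_pvEnsure]; simp [hP]

lemma pvFoldl_eq (logs : List (List String)) (d : PySem.Dict String (PySem.Dict String (PySem.Set String)))
    (hP : d.contains "process" = true)
    (hpre : ∀ t ∈ logs, "process" ∈ t → t.length = 1) :
    logs.foldl pvAstep d = logs.foldl pvBstep d := by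
  induction logs generalizing d with
  | nil => rfl
  | cons t rest ih =>
    simp only [List.foldl_cons]
    rw [pvStep_eq d hP t (hpre t (by simp))]
    exact ih (pvBstep d t) (contains_pvBstep d t hP) (fun t' ht' => hpre t' (by simp [ht']))

-- ===== VERDICT (by name: the statement is the Claim_ definition above) =====
theorem positional_set_spec : Claim_equal_positional_set := by
  intro logs _ hpre
  unfold Spec_positional_set positional_set positional_set_alt
  rw [pvFoldl_eq logs pvInit (by decide) hpre]
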